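-- pv_equiv track=rewrite | github.com/islamfaysalfouad/OS-Algorithms-Project | OSproject.py | run_memory_algorithm
-- ===== SOURCE A (Python) =====
-- def run_memory_algorithm(algo_name, block_sizes, process_sizes):
--     blocks = [[size, size, False] for size in block_sizes]
--     allocation = [-1] * len(process_sizes)
--
--     for i, p_size in enumerate(process_sizes):
--         best_idx = -1
--         for j in range(len(blocks)):
--             if not blocks[j][2] and blocks[j][0] >= p_size:
--                 if algo_name == "First Fit":
--                     best_idx = j
--                     break
--                 elif algo_name == "Best Fit":
--                     if best_idx == -1 or blocks[j][0] < blocks[best_idx][0]: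
--                         best_idx = j
--         if best_idx != -1:
--             allocation[i] = best_idx
--             blocks[best_idx][2] = True
--
--     internal_frag = 0
--     for i, b_idx in enumerate(allocation):
--         if b_idx != -1:
--             internal_frag += (blocks[b_idx][1] - process_sizes[i])
--     external_frag = sum(b[1] for b in blocks if not b[2])
--
--     return allocation, internal_frag, external_frag
-- ===== SOURCE B (Python) =====
-- def run_memory_algorithm(algo_name, block_sizes, process_sizes):
--     # Best Fit is First Fit on a (size, index)-sorted view of the free blocks:
--     # keep one ordered free-index list and always take its first fitting entry.
--     if algo_name == "First Fit":
--         free = list(range(len(block_sizes)))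
--     elif algo_name == "Best Fit":
--         free = sorted(range(len(block_sizes)), key=lambda j: (block_sizes[j], j))
--     else:
--         return [-1] * len(process_sizes), 0, sum(block_sizes)
--
--     allocation = []
--     for p in process_sizes:
--         chosen = -1
--         for k, j in enumerate(free):
--             if block_sizes[j] >= p:
--                 chosen = j
--                 del free[k]
--                 break
--         allocation.append(chosen)
--
--     internal = sum(block_sizes[b] - p for b, p in zip(allocation, process_sizes) if b != -1)
--     external = sum(block_sizes[j] for j in free)
--     return allocation, internal, external
-- ===== Notes on version B (the rewrite author's own statement) =====
-- stated objective: faster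
-- what changed: Instead of rescanning the whole block array (including already-allocated blocks) for every process, B maintains a single ordered free-index list - natural order for First Fit, (size,index)-sorted order for Best Fit, so Best Fit becomes First Fit on the sorted view - stops at the first fitting entry and deletes it, and computes fragmentation from the allocation list and the remaining free list.
import Mathlib
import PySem

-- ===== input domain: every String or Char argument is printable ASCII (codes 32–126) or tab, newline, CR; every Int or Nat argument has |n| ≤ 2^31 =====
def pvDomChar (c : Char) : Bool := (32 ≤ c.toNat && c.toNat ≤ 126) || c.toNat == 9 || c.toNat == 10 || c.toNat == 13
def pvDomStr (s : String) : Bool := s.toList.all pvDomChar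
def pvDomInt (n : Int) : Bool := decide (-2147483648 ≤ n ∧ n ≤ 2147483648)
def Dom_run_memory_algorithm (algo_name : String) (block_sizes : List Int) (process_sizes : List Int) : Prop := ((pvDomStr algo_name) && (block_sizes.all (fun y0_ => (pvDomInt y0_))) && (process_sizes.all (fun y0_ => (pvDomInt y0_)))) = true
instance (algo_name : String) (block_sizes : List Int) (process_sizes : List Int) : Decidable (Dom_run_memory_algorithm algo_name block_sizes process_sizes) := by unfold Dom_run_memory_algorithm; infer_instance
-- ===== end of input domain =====

-- B replaces A's per-process rescan of all blocks by one ordered free-index list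
-- (Best Fit = First Fit on a (size, index)-sorted view of the free blocks); the equivalence
-- of the return values is proved for all inputs (both programs are total).

-- ===== PORT A =====
def aInner (algo : String) (blocks : List (Int × Int × Bool)) (p : Int) : List Nat → Int → Int
  | [], best => best
  | j :: js, best =>
    let b := (PySem.List.pyGet? blocks (j : Int)).getD (0, 0, false)
    if b.2.2 = false ∧ b.1 ≥ p then
      if algo = "First Fit" then (j : Int)
      else if algo = "Best Fit" then
        if best = -1 ∨ b.1 < ((PySem.List.pyGet? blocks best).getD (0, 0, false)).1 then
          aInner algo blocks p js (j : Int)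
        else aInner algo blocks p js best
      else aInner algo blocks p js best
    else aInner algo blocks p js best

def aOuter (algo : String) : List (Int × Int) → List (Int × Int × Bool) → List Int → List (Int × Int × Bool) × List Int
  | [], blocks, alloc => (blocks, alloc)
  | (i, p) :: rest, blocks, alloc =>
    let best := aInner algo blocks p (List.range blocks.length) (-1)
    if best ≠ -1 then
      let blk := (PySem.List.pyGet? blocks best).getD (0, 0, false)
      aOuter algo rest (PySem.List.pySetD blocks best (blk.1, blk.2.1, true)) (PySem.List.pySetD alloc i best)
    else
      aOuter algo rest blocks alloc

def run_memory_algorithm (algo_name : String) (block_sizes : List Int) (process_sizes : List Int) : List Int × Int × Int :=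
  let blocks := block_sizes.map (fun size => (size, size, false))
  let allocation : List Int := List.replicate process_sizes.length (-1)
  let r := aOuter algo_name (PySem.List.enumerate process_sizes 0) blocks allocation
  let internal := (PySem.List.enumerate r.2 0).foldl
      (fun acc q => if q.2 ≠ -1 then
          acc + (((PySem.List.pyGet? r.1 q.2).getD (0, 0, false)).2.1 - PySem.List.pyGetD process_sizes q.1 0)
        else acc) 0
  let external := (r.1.filter (fun b => !b.2.2)).foldl (fun acc b => acc + b.2.1) 0
  (r.2, internal, external)

-- ===== PORT B =====
def bGet (bs : List Int) (i : Int) : Int := (PySem.List.pyGet? bs i).getD 0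

def bPick (bs : List Int) (p : Int) : List Nat → Int × List Nat
  | [] => (-1, [])
  | j :: rest =>
    if bGet bs (j : Int) ≥ p then ((j : Int), rest)
    else
      let r := bPick bs p rest
      (r.1, j :: r.2)

def bLoop (bs : List Int) : List Int → List Nat → List Int × List Nat
  | [], free => ([], free)
  | p :: ps, free =>
    let r := bPick bs p free
    let rest := bLoop bs ps r.2
    (r.1 :: rest.1, rest.2)

def bRun (bs ps : List Int) (free0 : List Nat) : List Int × Int × Int :=
  let r := bLoop bs ps free0
  let internal := (r.1.zip ps).foldl (fun acc q => if q.1 ≠ -1 then acc + (bGet bs q.1 - q.2) else acc) 0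
  let external := r.2.foldl (fun (acc : Int) (j : Nat) => acc + bGet bs (j : Int)) 0
  (r.1, internal, external)

def run_memory_algorithm_alt (algo_name : String) (block_sizes : List Int) (process_sizes : List Int) : List Int × Int × Int :=
  if algo_name = "First Fit" then
    bRun block_sizes process_sizes (List.range block_sizes.length)
  else if algo_name = "Best Fit" then
    bRun block_sizes process_sizes
      (PySem.List.sorted2 (List.range block_sizes.length) (fun j => bGet block_sizes (j : Int)) (fun j => (j : Int)) false)
  else
    (List.replicate process_sizes.length (-1), 0, block_sizes.sum)

-- ===== PRECONDITION & SPEC =====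
def Spec_run_memory_algorithm (algo_name : String) (block_sizes : List Int) (process_sizes : List Int) (out : List Int × Int × Int) : Prop := out = run_memory_algorithm_alt algo_name block_sizes process_sizes
instance (algo_name : String) (block_sizes : List Int) (process_sizes : List Int) (out : List Int × Int × Int) : Decidable (Spec_run_memory_algorithm algo_name block_sizes process_sizes out) := by unfold Spec_run_memory_algorithm; infer_instance

-- ===== CLAIM (what is proved, stated in full; the proofs are below) =====
def Claim_equal_run_memory_algorithm : Prop := ∀ (algo_name : String) (block_sizes : List Int) (process_sizes : List Int), Dom_run_memory_algorithm algo_name block_sizes process_sizes → Spec_run_memory_algorithm algo_name block_sizes process_sizes (run_memory_algorithm algo_name block_sizes process_sizes)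

-- ===== LEMMAS AND PROOFS =====

def blocksOf (bs : List Int) (u : List Bool) : List (Int × Int × Bool) :=
  (bs.zip u).map (fun q => (q.1, q.1, q.2))

def freeB (u : List Bool) (j : Nat) : Bool := !u.getD j true

def fitB (bs : List Int) (p : Int) (j : Nat) : Bool := decide (bGet bs (j : Int) ≥ p)

def eligB (bs : List Int) (u : List Bool) (p : Int) (j : Nat) : Bool := freeB u j && fitB bs p j

def IsMinAt (bs : List Int) (E : List Nat) (x : Nat) : Prop :=
  x ∈ E ∧ ∀ y ∈ E, bs.getD x 0 < bs.getD y 0 ∨ (bs.getD x 0 = bs.getD y 0 ∧ x ≤ y)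

def natFold (bs : List Int) (x : Nat) : List Nat → Nat
  | [] => x
  | j :: js => if bs.getD j 0 < bs.getD x 0 then natFold bs j js else natFold bs x js

theorem bGet_natCast (bs : List Int) (j : Nat) : bGet bs (j : Int) = bs.getD j 0 := by
  simp [bGet, PySem.List.pyGet?_natCast, List.getD_eq_getElem?_getD]

theorem length_blocksOf (bs : List Int) (u : List Bool) (h : u.length = bs.length) :
    (blocksOf bs u).length = bs.length := by
  simp [blocksOf, h]

theorem get_blocksOf (bs : List Int) (u : List Bool) (h : u.length = bs.length)
    (j : Nat) (hj : j < bs.length) :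
    (PySem.List.pyGet? (blocksOf bs u) (j : Int)).getD (0, 0, false)
      = (bs.getD j 0, bs.getD j 0, u.getD j true) := by
  have hu : j < u.length := by omega
  have hz : j < (bs.zip u).length := by simp [List.length_zip, h]; omega
  have hbl : (blocksOf bs u)[j]? = some ((bs.zip u)[j].1, (bs.zip u)[j].1, (bs.zip u)[j].2) := by
    simp [blocksOf, List.getElem?_map, List.getElem?_eq_getElem hz]
  rw [PySem.List.pyGet?_natCast, hbl]
  simp [List.getElem_zip, List.getD_eq_getElem?_getD, List.getElem?_eq_getElem hj,
    List.getElem?_eq_getElem hu]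

theorem bPick_eq (bs : List Int) (p : Int) (free : List Nat) :
    bPick bs p free
      = (((free.find? (fitB bs p)).map (fun (j : Nat) => (j : Int))).getD (-1),
         free.eraseP (fitB bs p)) := by
  induction free with
  | nil => rfl
  | cons j rest ih =>
    by_cases hj : bGet bs (j : Int) ≥ p
    · simp [bPick, hj, fitB]
    · simp [bPick, hj, fitB, ih]

theorem eraseP_eq_filter_ne (q : Nat → Bool) (l : List Nat) (x : Nat)
    (hnd : l.Nodup) (hf : l.find? q = some x) :
    l.eraseP q = l.filter (fun y => y ≠ x) := by
  induction l with
  | nil => simp at hf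
  | cons a t ih =>
    rcases List.nodup_cons.mp hnd with ⟨ha, hnt⟩
    by_cases hqa : q a
    · rw [List.find?_cons_of_pos hqa] at hf
      injection hf with hax
      subst hax
      rw [List.eraseP_cons_of_pos hqa, List.filter_cons_of_neg (by simp)]
      exact (List.filter_eq_self.mpr (fun y hy => by simp; rintro rfl; exact ha hy)).symm
    · rw [List.find?_cons_of_neg hqa] at hf
      have hax : a ≠ x := by
        rintro rfl
        exact hqa (List.find?_some hf)
      rw [List.eraseP_cons_of_neg hqa]
      simp [hax, ih hnt hf]

theorem filter_free_set (u : List Bool) (x : Nat) (order : List Nat)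
    (hm : ∀ j ∈ order, j < u.length) :
    order.filter (freeB (u.set x true)) = (order.filter (freeB u)).filter (fun y => y ≠ x) := by
  rw [List.filter_filter]
  apply List.filter_congr
  intro j hj
  have hju : j < u.length := hm j hj
  by_cases hjx : j = x
  · subst hjx
    simp [freeB, List.getD_eq_getElem?_getD,
      List.getElem?_eq_getElem (show j < (u.set j true).length from by simpa using hju),
      List.getElem_set_self]
  · simp [freeB, List.getD_eq_getElem?_getD, hjx, List.getElem?_eq_getElem hju,
      List.getElem?_eq_getElem (show j < (u.set x true).length from by simpa using hju),
      List.getElem_set_ne (show x ≠ j from fun hh => hjx hh.symm)]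

theorem aInner_other (algo : String) (h1 : algo ≠ "First Fit") (h2 : algo ≠ "Best Fit")
    (blocks : List (Int × Int × Bool)) (p : Int) (js : List Nat) (best : Int) :
    aInner algo blocks p js best = best := by
  induction js with
  | nil => rfl
  | cons j t ih => simp [aInner, h1, h2, ih]

theorem aInner_FF (blocks : List (Int × Int × Bool)) (p : Int) (js : List Nat) (best : Int) :
    aInner "First Fit" blocks p js best
      = match js.find? (fun (j : Nat) =>
            let b := (PySem.List.pyGet? blocks (j : Int)).getD (0, 0, false)
            decide (b.2.2 = false ∧ b.1 ≥ p)) with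
        | some j => (j : Int)
        | none => best := by
  induction js with
  | nil => rfl
  | cons j t ih =>
    by_cases hc : ((PySem.List.pyGet? blocks (j : Int)).getD (0, 0, false)).2.2 = false
        ∧ ((PySem.List.pyGet? blocks (j : Int)).getD (0, 0, false)).1 ≥ p
    · simp only [PySem.List.pyGet?_natCast] at hc
      simp [aInner, hc.1, hc.2]
    · simp only [aInner, if_neg hc, ih]
      rw [List.find?_cons_of_neg]
      simpa using hc

theorem elig_iff (bs : List Int) (u : List Bool) (h : u.length = bs.length) (p : Int)
    (j : Nat) (hj : j < bs.length) :
    (decide ((((PySem.List.pyGet? (blocksOf bs u) (j : Int)).getD (0, 0, false)).2.2 = false)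
        ∧ (((PySem.List.pyGet? (blocksOf bs u) (j : Int)).getD (0, 0, false)).1 ≥ p)))
      = eligB bs u p j := by
  rw [get_blocksOf bs u h j hj]
  cases hgd : u[j]?.getD true <;>
    simp [eligB, freeB, fitB, bGet_natCast, List.getD_eq_getElem?_getD, hgd, ge_iff_le]

theorem aInner_BF_cons (blocks : List (Int × Int × Bool)) (p : Int) (j : Nat) (t : List Nat) (best : Int) :
    aInner "Best Fit" blocks p (j :: t) best =
      if ((PySem.List.pyGet? blocks (j : Int)).getD (0, 0, false)).2.2 = false
          ∧ ((PySem.List.pyGet? blocks (j : Int)).getD (0, 0, false)).1 ≥ p then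
        (if best = -1 ∨ ((PySem.List.pyGet? blocks (j : Int)).getD (0, 0, false)).1
              < ((PySem.List.pyGet? blocks best).getD (0, 0, false)).1 then
          aInner "Best Fit" blocks p t (j : Int)
        else aInner "Best Fit" blocks p t best)
      else aInner "Best Fit" blocks p t best := by
  simp [aInner]

theorem aInner_BF (bs : List Int) (u : List Bool) (h : u.length = bs.length) (p : Int) :
    ∀ (js : List Nat) (j0 : Nat), (∀ j ∈ js, j < bs.length) → j0 < bs.length →
    aInner "Best Fit" (blocksOf bs u) p js (j0 : Int)
      = (natFold bs j0 (js.filter (eligB bs u p)) : Int) := by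
  intro js
  induction js with
  | nil => intro j0 _ _; rfl
  | cons j t ih =>
    intro j0 hjs hj0
    have hj : j < bs.length := hjs j (by simp)
    have hb := get_blocksOf bs u h j hj
    have hb0 := get_blocksOf bs u h j0 hj0
    rw [aInner_BF_cons, hb, hb0]
    by_cases h1 : (u.getD j true = false ∧ bs.getD j 0 ≥ p)
    · have helig : eligB bs u p j = true := by
        simp [eligB, freeB, fitB, bGet_natCast, ge_iff_le]
        exact ⟨by simpa [List.getD_eq_getElem?_getD] using h1.1,
          by simpa [List.getD_eq_getElem?_getD] using h1.2⟩
      rw [if_pos (show ((bs.getD j 0, bs.getD j 0, u.getD j true) : Int × Int × Bool).2.2 = false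
          ∧ ((bs.getD j 0, bs.getD j 0, u.getD j true) : Int × Int × Bool).1 ≥ p from ⟨h1.1, h1.2⟩)]
      rw [List.filter_cons_of_pos helig]
      simp only [natFold]
      by_cases hlt : bs.getD j 0 < bs.getD j0 0
      · rw [if_pos (Or.inr hlt), if_pos hlt]
        exact ih j (fun x hx => hjs x (by simp [hx])) hj
      · rw [if_neg (fun hor => hor.elim (fun hc => absurd hc (by omega)) hlt), if_neg hlt]
        exact ih j0 (fun x hx => hjs x (by simp [hx])) hj0
    · have helig : ¬ (eligB bs u p j = true) := by
        simpa [eligB, freeB, fitB, bGet_natCast, ge_iff_le, Bool.and_eq_true,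
          Bool.not_eq_true', decide_eq_true_eq] using h1
      rw [if_neg (fun hc => h1 ⟨hc.1, hc.2⟩), List.filter_cons_of_neg helig]
      exact ih j0 (fun x hx => hjs x (by simp [hx])) hj0

theorem aInner_BF_start (bs : List Int) (u : List Bool) (h : u.length = bs.length) (p : Int) :
    ∀ (js : List Nat), (∀ j ∈ js, j < bs.length) →
    aInner "Best Fit" (blocksOf bs u) p js (-1)
      = match js.filter (eligB bs u p) with
        | [] => (-1 : Int)
        | j :: t => (natFold bs j t : Int) := by
  intro js
  induction js with
  | nil => intro _; rfl
  | cons j t ih =>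
    intro hjs
    have hj : j < bs.length := hjs j (by simp)
    have hb := get_blocksOf bs u h j hj
    rw [aInner_BF_cons, hb]
    by_cases h1 : (u.getD j true = false ∧ bs.getD j 0 ≥ p)
    · have helig : eligB bs u p j = true := by
        simp [eligB, freeB, fitB, bGet_natCast, ge_iff_le]
        exact ⟨by simpa [List.getD_eq_getElem?_getD] using h1.1,
          by simpa [List.getD_eq_getElem?_getD] using h1.2⟩
      rw [if_pos (show ((bs.getD j 0, bs.getD j 0, u.getD j true) : Int × Int × Bool).2.2 = false
          ∧ ((bs.getD j 0, bs.getD j 0, u.getD j true) : Int × Int × Bool).1 ≥ p from ⟨h1.1, h1.2⟩)]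
      rw [if_pos (Or.inl rfl), List.filter_cons_of_pos helig]
      exact aInner_BF bs u h p t j (fun x hx => hjs x (by simp [hx])) hj
    · have helig : ¬ (eligB bs u p j = true) := by
        simpa [eligB, freeB, fitB, bGet_natCast, ge_iff_le, Bool.and_eq_true,
          Bool.not_eq_true', decide_eq_true_eq] using h1
      rw [if_neg (fun hc => h1 ⟨hc.1, hc.2⟩), List.filter_cons_of_neg helig]
      exact ih (fun x hx => hjs x (by simp [hx]))

theorem natFold_min (bs : List Int) :
    ∀ (E : List Nat) (x : Nat), (x :: E).Pairwise (· < ·) →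
    IsMinAt bs (x :: E) (natFold bs x E) := by
  intro E
  induction E with
  | nil => intro x _; exact ⟨by simp [natFold], by simp [natFold]⟩
  | cons j t ih =>
    intro x hp
    rcases List.pairwise_cons.mp hp with ⟨hx, hp'⟩
    rcases List.pairwise_cons.mp hp' with ⟨hj, hpt⟩
    have hxj : x < j := hx j (by simp)
    by_cases hlt : bs.getD j 0 < bs.getD x 0
    · rw [show natFold bs x (j :: t) = natFold bs j t from by simp only [natFold, if_pos hlt]]
      have hmin := ih j (List.pairwise_cons.mpr ⟨hj, hpt⟩)
      refine ⟨List.mem_cons_of_mem _ hmin.1, ?_⟩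
      intro y hy
      rcases List.mem_cons.mp hy with rfl | hy'
      · rcases hmin.2 j (by simp) with hlt2 | ⟨heq2, _⟩
        · left; omega
        · left; omega
      · exact hmin.2 y hy'
    · rw [show natFold bs x (j :: t) = natFold bs x t from by simp only [natFold, if_neg hlt]]
      have hmin := ih x (List.pairwise_cons.mpr ⟨fun y hy => hx y (by simp [hy]), hpt⟩)
      refine ⟨?_, ?_⟩
      · rcases List.mem_cons.mp hmin.1 with h | h
        · simp [h]
        · simp [h]
      intro y hy
      rcases List.mem_cons.mp hy with rfl | hy'
      · exact hmin.2 y (by simp)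
      rcases List.mem_cons.mp hy' with rfl | hy''
      · rcases hmin.2 x (by simp) with hlt2 | ⟨heq2, hle2⟩
        · left; omega
        · by_cases hsz : bs.getD (natFold bs x t) 0 < bs.getD y 0
          · left; exact hsz
          · right; exact ⟨by omega, by omega⟩
      · exact hmin.2 y (by simp [hy''])

theorem minAt_unique (bs : List Int) (S T : List Nat) (x y : Nat)
    (hx : IsMinAt bs S x) (hy : IsMinAt bs T y) (hst : ∀ z, z ∈ S ↔ z ∈ T) : x = y := by
  have h1 := hx.2 y ((hst y).mpr hy.1)
  have h2 := hy.2 x ((hst x).mp hx.1)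
  rcases h1 with h1 | h1 <;> rcases h2 with h2 | h2 <;> omega

theorem head_sorted_min (bs : List Int) (L : List Nat) (x : Nat) (t : List Nat)
    (hp : L.Pairwise (fun a b => (toLex ((bs.getD a 0 : Int), (a : Int))) ≤ toLex ((bs.getD b 0 : Int), (b : Int))))
    (hL : L = x :: t) : IsMinAt bs L x := by
  subst hL
  rcases List.pairwise_cons.mp hp with ⟨hx, _⟩
  refine ⟨by simp, ?_⟩
  intro y hy
  rcases List.mem_cons.mp hy with rfl | hy'
  · right; exact ⟨rfl, le_refl _⟩
  · have := hx y hy'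
    rw [Prod.Lex.toLex_le_toLex] at this
    rcases this with h | ⟨h1, h2⟩
    · left; exact h
    · right; refine ⟨h1, ?_⟩
      have : ((x : Int)) ≤ (y : Int) := h2
      omega

theorem sorted2_eq_sorted_toLex (xs : List Nat) (k1 k2 : Nat → Int) :
    PySem.List.sorted2 xs k1 k2 false
      = PySem.List.sorted xs (fun x => toLex (k1 x, k2 x)) false := by
  have hf : (fun (a b : Nat) => decide (k1 a < k1 b) || (!decide (k1 b < k1 a) && decide (k2 a < k2 b)))
      = (fun (a b : Nat) => decide (toLex (k1 a, k2 a) < toLex (k1 b, k2 b))) := by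
    funext a b
    by_cases h1 : k1 a < k1 b
    · simp [Prod.Lex.toLex_lt_toLex, h1]
    · by_cases h2 : k1 b < k1 a
      · simp [Prod.Lex.toLex_lt_toLex, h1, h2, show ¬ (k1 a = k1 b) from by omega]
      · simp [Prod.Lex.toLex_lt_toLex, show k1 a = k1 b from by omega]
  simp only [PySem.List.sorted2, PySem.List.sorted]
  simp only [show (false = true) = False from by simp, if_false]
  rw [hf]

theorem find?_congr_mem {p q : Nat → Bool} : ∀ l : List Nat, (∀ a ∈ l, p a = q a) → l.find? p = l.find? q := by
  intro l
  induction l with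
  | nil => intro _; rfl
  | cons a t ih =>
    intro h
    have ha := h a (by simp)
    by_cases hp : p a
    · rw [List.find?_cons_of_pos hp, List.find?_cons_of_pos (ha ▸ hp)]
    · rw [List.find?_cons_of_neg hp, List.find?_cons_of_neg (ha ▸ hp),
        ih (fun x hx => h x (by simp [hx]))]

theorem find?_eq_head?_filter (p : Nat → Bool) : ∀ l : List Nat, l.find? p = (l.filter p).head? := by
  intro l
  induction l with
  | nil => rfl
  | cons a t ih =>
    by_cases hp : p a
    · rw [List.find?_cons_of_pos hp, List.filter_cons_of_pos hp]; rfl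
    · rw [List.find?_cons_of_neg hp, List.filter_cons_of_neg hp, ih]

theorem find?_filter_elig (bs : List Int) (u : List Bool) (p : Int) (l : List Nat) :
    (l.filter (freeB u)).find? (fitB bs p) = l.find? (eligB bs u p) := by
  have h : (fun a => decide (freeB u a = true ∧ fitB bs p a = true)) = eligB bs u p := by
    funext a; simp [eligB]
  rw [List.find?_filter, h]

theorem pick_FF (bs : List Int) (u : List Bool) (h : u.length = bs.length) (p : Int) :
    aInner "First Fit" (blocksOf bs u) p (List.range (blocksOf bs u).length) (-1)
      = (bPick bs p ((List.range bs.length).filter (freeB u))).1 := by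
  rw [aInner_FF, bPick_eq, length_blocksOf bs u h, find?_filter_elig]
  rw [find?_congr_mem (List.range bs.length)
    (fun j hj => elig_iff bs u h p j (List.mem_range.mp hj))]
  cases (List.range bs.length).find? (eligB bs u p) <;> rfl

theorem pick_BF (bs : List Int) (u : List Bool) (h : u.length = bs.length) (p : Int) :
    aInner "Best Fit" (blocksOf bs u) p (List.range (blocksOf bs u).length) (-1)
      = (bPick bs p ((PySem.List.sorted2 (List.range bs.length)
            (fun j => bGet bs (j : Int)) (fun j => (j : Int)) false).filter (freeB u))).1 := by
  rw [length_blocksOf bs u h, bPick_eq, find?_filter_elig,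
    aInner_BF_start bs u h p _ (fun j hj => List.mem_range.mp hj)]
  set L := PySem.List.sorted2 (List.range bs.length) (fun j => bGet bs (j : Int)) (fun j => (j : Int)) false with hLdef
  have hperm : L.Perm (List.range bs.length) := PySem.List.sorted2_perm _ _ _ _
  have hpermE : (L.filter (eligB bs u p)).Perm ((List.range bs.length).filter (eligB bs u p)) :=
    List.Perm.filter _ hperm
  have hpair : L.Pairwise (fun a b =>
      (toLex ((bs.getD a 0 : Int), (a : Int))) ≤ toLex ((bs.getD b 0 : Int), (b : Int))) := by
    have := PySem.List.sorted_pairwise (List.range bs.length)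
      (fun j => toLex ((bGet bs (j : Int)), (j : Int)))
    rw [hLdef, sorted2_eq_sorted_toLex]
    simpa [bGet_natCast] using this
  rw [find?_eq_head?_filter]
  cases hE : (List.range bs.length).filter (eligB bs u p) with
  | nil =>
    have : L.filter (eligB bs u p) = [] := List.Perm.eq_nil (hE ▸ hpermE)
    simp [this]
  | cons j t =>
    have hne : L.filter (eligB bs u p) ≠ [] := by
      intro hc
      rw [hc, hE] at hpermE
      exact absurd hpermE.symm.eq_nil (by simp)
    cases hE2 : L.filter (eligB bs u p) with
    | nil => exact absurd hE2 hne
    | cons x t2 =>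
      have hmin1 : IsMinAt bs (j :: t) (natFold bs j t) :=
        natFold_min bs t j (hE ▸ (List.pairwise_lt_range.filter _))
      have hmin2 : IsMinAt bs (x :: t2) x :=
        head_sorted_min bs _ x t2 (hpair.sublist (hE2 ▸ L.filter_sublist)) rfl
      have hx : natFold bs j t = x := by
        refine minAt_unique bs _ _ _ _ hmin1 hmin2 ?_
        intro z
        rw [← hE, ← hE2]
        exact ⟨fun hz => hpermE.symm.subset hz, fun hz => hpermE.subset hz⟩
      simp [hx]

theorem blocksOf_set (bs : List Int) : ∀ (u : List Bool) (x : Nat), u.length = bs.length → x < bs.length →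
    PySem.List.pySetD (blocksOf bs u) ((x : Nat) : Int) (bs.getD x 0, bs.getD x 0, true)
      = blocksOf bs (u.set x true) := by
  induction bs with
  | nil => intro u x h hx; simp at hx
  | cons b bt ih =>
    intro u x h hx
    cases u with
    | nil => simp at h
    | cons a at' =>
      cases x with
      | zero => rw [PySem.List.pySetD_natCast]; rfl
      | succ n =>
        have h' : at'.length = bt.length := by simpa using h
        have hx' : n < bt.length := by simp at hx; omega
        have hrec := ih at' n h' hx'
        rw [PySem.List.pySetD_natCast] at hrec ⊢
        show ((b, b, a) :: blocksOf bt at').set (n + 1) ((b :: bt).getD (n + 1) 0, (b :: bt).getD (n + 1) 0, true)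
          = (b, b, a) :: blocksOf bt (at'.set n true)
        rw [List.set_cons_succ]
        simp only [List.getD_cons_succ]
        rw [hrec]

theorem bLoop_length (bs : List Int) : ∀ (ps : List Int) (free : List Nat),
    (bLoop bs ps free).1.length = ps.length := by
  intro ps
  induction ps with
  | nil => intro free; rfl
  | cons p pt ih => intro free; simp [bLoop, ih]

theorem bPick_val (bs : List Int) (p : Int) (free : List Nat) :
    (bPick bs p free).1 = -1 ∨ ∃ j : Nat, j ∈ free ∧ (bPick bs p free).1 = (j : Int) := by
  rw [bPick_eq]
  cases hf : free.find? (fitB bs p) with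
  | none => left; rfl
  | some x => right; exact ⟨x, List.mem_of_find?_eq_some hf, by simp⟩

theorem bPick_rest_subset (bs : List Int) (p : Int) (free : List Nat) :
    ∀ j ∈ (bPick bs p free).2, j ∈ free := by
  rw [bPick_eq]
  exact fun j hj => (List.eraseP_sublist).mem hj

theorem bLoop_entries (bs : List Int) : ∀ (ps : List Int) (free : List Nat),
    (∀ j ∈ free, j < bs.length) →
    ∀ b ∈ (bLoop bs ps free).1, b = -1 ∨ ∃ j : Nat, j < bs.length ∧ b = (j : Int) := by
  intro ps
  induction ps with
  | nil => intro free _ b hb; simp [bLoop] at hb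
  | cons p pt ih =>
    intro free hf b hb
    simp only [bLoop, List.mem_cons] at hb
    rcases hb with rfl | hb
    · rcases bPick_val bs p free with h | ⟨j, hj, h⟩
      · left; exact h
      · right; exact ⟨j, hf j hj, h⟩
    · exact ih (bPick bs p free).2 (fun j hj => hf j (bPick_rest_subset bs p free j hj)) b hb

theorem outer_loop (algo : String) (bs : List Int) (order : List Nat)
    (horder : order.Perm (List.range bs.length))
    (hpick : ∀ (u : List Bool) (p : Int), u.length = bs.length →
      aInner algo (blocksOf bs u) p (List.range (blocksOf bs u).length) (-1)
        = (bPick bs p (order.filter (freeB u))).1) :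
    ∀ (ps : List Int) (u : List Bool) (done : List Int), u.length = bs.length →
      ∃ u', u'.length = bs.length ∧
        aOuter algo (PySem.List.enumerate ps (done.length : Int)) (blocksOf bs u)
            (done ++ List.replicate ps.length (-1))
          = (blocksOf bs u', done ++ (bLoop bs ps (order.filter (freeB u))).1) ∧
        (bLoop bs ps (order.filter (freeB u))).2 = order.filter (freeB u') := by
  have hmemo : ∀ j ∈ order, j < bs.length := fun j hj => List.mem_range.mp (horder.subset hj)
  have hnd : order.Nodup := horder.symm.nodup List.nodup_range
  intro ps
  induction ps with
  | nil =>
    intro u done hu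
    exact ⟨u, hu, by simp [PySem.List.enumerate_nil, aOuter, bLoop], by simp [bLoop]⟩
  | cons p pt ih =>
    intro u done hu
    have hlen : (blocksOf bs u).length = bs.length := length_blocksOf bs u hu
    have hv := hpick u p hu
    rw [hlen, bPick_eq] at hv
    cases hf : (order.filter (freeB u)).find? (fitB bs p) with
    | none =>
      -- no block fits: A skips, B appends -1 and keeps the free list
      rw [hf] at hv
      simp only [Option.map_none, Option.getD_none] at hv
      have herase : (order.filter (freeB u)).eraseP (fitB bs p) = order.filter (freeB u) :=
        List.eraseP_of_forall_not (by
          intro a ha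
          have := List.find?_eq_none.mp hf a ha
          simpa using this)
      obtain ⟨u', hu', heq, hfree⟩ := ih u (done ++ [-1]) hu
      refine ⟨u', hu', ?_, ?_⟩
      · rw [PySem.List.enumerate_cons]
        simp only [aOuter, hlen, hv]
        rw [if_neg (by simp)]
        have hcast : ((done.length : Int) + 1) = (((done ++ [-1]).length : Nat) : Int) := by simp
        have hrepl : done ++ List.replicate (p :: pt).length (-1)
            = (done ++ [-1]) ++ List.replicate pt.length (-1) := by
          simp [List.replicate_succ]
        rw [hcast, hrepl, heq]
        simp only [bLoop, bPick_eq, hf, herase]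
        simp
      · simp only [bLoop, bPick_eq, hf, herase]
        exact hfree
    | some x =>
      -- block x is allocated: A marks it used, B removes it from the free list
      rw [hf] at hv
      simp only [Option.map_some, Option.getD_some] at hv
      have hxmemf : x ∈ order.filter (freeB u) := List.mem_of_find?_eq_some hf
      have hxo : x ∈ order := List.mem_of_mem_filter hxmemf
      have hxm : x < bs.length := hmemo x hxo
      have herase : (order.filter (freeB u)).eraseP (fitB bs p)
          = order.filter (freeB (u.set x true)) := by
        rw [eraseP_eq_filter_ne (fitB bs p) _ x (hnd.filter _) hf,
          filter_free_set u x order (fun j hj => by rw [hu]; exact hmemo j hj)]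
      obtain ⟨u', hu', heq, hfree⟩ := ih (u.set x true) (done ++ [(x : Int)]) (by simp [hu])
      refine ⟨u', hu', ?_, ?_⟩
      · rw [PySem.List.enumerate_cons]
        simp only [aOuter, hlen, hv]
        rw [if_pos (by omega)]
        have hblocks : PySem.List.pySetD (blocksOf bs u) ((x : Nat) : Int)
              (((PySem.List.pyGet? (blocksOf bs u) ((x : Nat) : Int)).getD (0, 0, false)).1,
               ((PySem.List.pyGet? (blocksOf bs u) ((x : Nat) : Int)).getD (0, 0, false)).2.1, true)
            = blocksOf bs (u.set x true) := by
          rw [get_blocksOf bs u hu x hxm]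
          exact blocksOf_set bs u x hu hxm
        have halloc : PySem.List.pySetD (done ++ List.replicate (p :: pt).length (-1))
              (done.length : Int) ((x : Nat) : Int)
            = (done ++ [((x : Nat) : Int)]) ++ List.replicate pt.length (-1) := by
          rw [PySem.List.pySetD_natCast, List.set_append_right _ _ (le_refl _)]
          simp [List.replicate_succ]
        rw [hblocks, halloc]
        have hcast : ((done.length : Int) + 1) = (((done ++ [((x : Nat) : Int)]).length : Nat) : Int) := by
          simp
        rw [hcast, heq]
        simp only [bLoop, bPick_eq, hf, herase]
        simp
      · simp only [bLoop, bPick_eq, hf, herase]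
        exact hfree

theorem internal_eq (bs : List Int) (u' : List Bool) (h : u'.length = bs.length) :
    ∀ (alloc psuf pre : List Int) (acc : Int), alloc.length = psuf.length →
      (∀ b ∈ alloc, b = -1 ∨ ∃ j : Nat, j < bs.length ∧ b = (j : Int)) →
      (PySem.List.enumerate alloc (pre.length : Int)).foldl
          (fun acc q => if q.2 ≠ -1 then
              acc + (((PySem.List.pyGet? (blocksOf bs u') q.2).getD (0, 0, false)).2.1
                - PySem.List.pyGetD (pre ++ psuf) q.1 0)
            else acc) acc
        = (alloc.zip psuf).foldl (fun acc q => if q.1 ≠ -1 then acc + (bGet bs q.1 - q.2) else acc) acc := by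
  intro alloc
  induction alloc with
  | nil => intro psuf pre acc _ _; rfl
  | cons b t ih =>
    intro psuf pre acc hlen hent
    cases psuf with
    | nil => simp at hlen
    | cons p pt =>
      rw [PySem.List.enumerate_cons, List.zip_cons_cons, List.foldl_cons, List.foldl_cons]
      have hp : PySem.List.pyGetD (pre ++ p :: pt) (pre.length : Int) 0 = p := by
        rw [PySem.List.pyGetD_natCast, List.getD_eq_getElem?_getD,
          List.getElem?_append_right (le_refl _)]
        simp
      have hstep : (if b ≠ -1 then
            acc + (((PySem.List.pyGet? (blocksOf bs u') b).getD (0, 0, false)).2.1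
              - PySem.List.pyGetD (pre ++ p :: pt) (pre.length : Int) 0)
          else acc)
          = (if b ≠ -1 then acc + (bGet bs b - p) else acc) := by
        rcases hent b (by simp) with rfl | ⟨j, hj, rfl⟩
        · simp
        · rw [hp, get_blocksOf bs u' h j hj]
          simp [bGet_natCast]
      rw [hstep]
      have hshift : ((pre.length : Int) + 1) = (((pre ++ [p]).length : Nat) : Int) := by simp
      have happ : pre ++ p :: pt = (pre ++ [p]) ++ pt := by simp
      rw [hshift, happ]
      exact ih pt (pre ++ [p]) _ (by simpa using hlen) (fun b hb => hent b (by simp [hb]))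

theorem ext_lists (bs : List Int) : ∀ (u' : List Bool), u'.length = bs.length →
    ((blocksOf bs u').filter (fun b => !b.2.2)).map (fun b => b.2.1)
      = ((List.range bs.length).filter (freeB u')).map (fun j => bs.getD j 0) := by
  induction bs with
  | nil => intro u' _; simp [blocksOf]
  | cons b bt ih =>
    intro u' h
    cases u' with
    | nil => simp at h
    | cons a at' =>
      have h' : at'.length = bt.length := by simpa using h
      have hmapf : (List.map Nat.succ (List.range bt.length)).filter (freeB (a :: at'))
          = List.map Nat.succ ((List.range bt.length).filter (freeB at')) := by
        rw [List.filter_map]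
        exact congrArg (List.map Nat.succ)
          (List.filter_congr (fun j _ => by simp [freeB, Function.comp]))
      rw [show blocksOf (b :: bt) (a :: at') = (b, b, a) :: blocksOf bt at' from rfl,
        List.length_cons, List.range_succ_eq_map, List.filter_cons, List.filter_cons, hmapf]
      have htail : ((blocksOf bt at').filter (fun b => !b.2.2)).map (fun b => b.2.1)
          = (List.map Nat.succ ((List.range bt.length).filter (freeB at'))).map
              (fun j => (b :: bt).getD j 0) := by
        rw [List.map_map, ih at' h']
        apply List.map_congr_left
        intro j _
        simp
      cases a with
      | false =>
        rw [if_pos (show (!((b, b, false) : Int × Int × Bool).2.2) = true from rfl),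
          if_pos (show freeB (false :: at') 0 = true from by simp [freeB]),
          List.map_cons, List.map_cons, htail]
        rfl
      | true =>
        rw [if_neg (by simp), if_neg (by simp [freeB])]
        exact htail

theorem external_eq (bs : List Int) (u' : List Bool) (h : u'.length = bs.length)
    (order : List Nat) (horder : order.Perm (List.range bs.length)) :
    ((blocksOf bs u').filter (fun b => !b.2.2)).foldl (fun acc b => acc + b.2.1) 0
      = (order.filter (freeB u')).foldl (fun (acc : Int) (j : Nat) => acc + bGet bs (j : Int)) 0 := by
  have hperm : ((order.filter (freeB u')).map (fun (j : Nat) => bGet bs (j : Int))).Perm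
      (((List.range bs.length).filter (freeB u')).map (fun (j : Nat) => bGet bs (j : Int))) :=
    (horder.filter _).map _
  rw [PySem.List.foldl_add _ (fun (b : Int × Int × Bool) => b.2.1) 0,
    PySem.List.foldl_add _ (fun (j : Nat) => bGet bs (j : Int)) 0,
    ext_lists bs u' h, hperm.sum_eq]
  exact congrArg (fun s => 0 + s)
    (congrArg List.sum (List.map_congr_left (fun j _ => (bGet_natCast bs j).symm)))

theorem blocksOf_init (bs : List Int) :
    bs.map (fun size => (size, size, false)) = blocksOf bs (List.replicate bs.length false) := by
  induction bs with
  | nil => rfl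
  | cons b bt ih => simp only [List.map_cons, List.length_cons]; rw [List.replicate_succ, ih]; rfl

theorem filter_free_init (bs : List Int) (order : List Nat)
    (hm : ∀ j ∈ order, j < bs.length) :
    order.filter (freeB (List.replicate bs.length false)) = order := by
  apply List.filter_eq_self.mpr
  intro j hj
  have := hm j hj
  simp [freeB, List.getD_eq_getElem?_getD, List.getElem?_eq_getElem
    (show j < (List.replicate bs.length false).length from by simpa using this)]

theorem internal_eq_nil (bs : List Int) (u' : List Bool) (h : u'.length = bs.length)
    (alloc ps : List Int) (hlen : alloc.length = ps.length)
    (hent : ∀ b ∈ alloc, b = -1 ∨ ∃ j : Nat, j < bs.length ∧ b = (j : Int)) :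
    (PySem.List.enumerate alloc 0).foldl
        (fun acc q => if q.2 ≠ -1 then
            acc + (((PySem.List.pyGet? (blocksOf bs u') q.2).getD (0, 0, false)).2.1
              - PySem.List.pyGetD ps q.1 0)
          else acc) 0
      = (alloc.zip ps).foldl (fun acc q => if q.1 ≠ -1 then acc + (bGet bs q.1 - q.2) else acc) 0 := by
  have := internal_eq bs u' h alloc ps [] 0 hlen hent
  simpa using this

theorem main_algo (bs ps : List Int) (order : List Nat)
    (horder : order.Perm (List.range bs.length)) (algo : String)
    (hpick : ∀ (u : List Bool) (p : Int), u.length = bs.length →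
      aInner algo (blocksOf bs u) p (List.range (blocksOf bs u).length) (-1)
        = (bPick bs p (order.filter (freeB u))).1) :
    run_memory_algorithm algo bs ps = bRun bs ps order := by
  have hmemo : ∀ j ∈ order, j < bs.length := fun j hj => List.mem_range.mp (horder.subset hj)
  obtain ⟨u', hu', heq, hfree⟩ := outer_loop algo bs order horder hpick ps
    (List.replicate bs.length false) [] (by simp)
  rw [filter_free_init bs order hmemo] at heq hfree
  simp only [List.length_nil, Nat.cast_zero, List.nil_append] at heq
  simp only [run_memory_algorithm, bRun]
  rw [blocksOf_init bs, heq]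
  refine Prod.ext rfl (Prod.ext ?_ ?_)
  · exact internal_eq_nil bs u' hu' (bLoop bs ps order).1 ps
      (by rw [bLoop_length]) (bLoop_entries bs ps order hmemo)
  · rw [hfree]
    exact external_eq bs u' hu' order horder

theorem aOuter_other (algo : String) (h1 : algo ≠ "First Fit") (h2 : algo ≠ "Best Fit") :
    ∀ (l : List (Int × Int)) (blocks : List (Int × Int × Bool)) (alloc : List Int),
    aOuter algo l blocks alloc = (blocks, alloc) := by
  intro l
  induction l with
  | nil => intro blocks alloc; rfl
  | cons q t ih =>
    intro blocks alloc
    obtain ⟨i, p⟩ := q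
    simp only [aOuter, aInner_other algo h1 h2]
    rw [if_neg (by simp)]
    exact ih blocks alloc

theorem internal_zero (f : Int × Int → Int) :
    ∀ (n : Nat) (s : Int) (acc : Int),
    (PySem.List.enumerate (List.replicate n (-1 : Int)) s).foldl
      (fun acc q => if q.2 ≠ -1 then acc + f q else acc) acc = acc := by
  intro n
  induction n with
  | zero => intro s acc; rfl
  | succ m ih =>
    intro s acc
    rw [List.replicate_succ, PySem.List.enumerate_cons, List.foldl_cons]
    rw [if_neg (by simp)]
    exact ih (s + 1) acc

theorem main_other (algo : String) (h1 : algo ≠ "First Fit") (h2 : algo ≠ "Best Fit")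
    (bs ps : List Int) :
    run_memory_algorithm algo bs ps = (List.replicate ps.length (-1), 0, bs.sum) := by
  simp only [run_memory_algorithm]
  rw [aOuter_other algo h1 h2]
  refine Prod.ext rfl (Prod.ext ?_ ?_)
  · exact internal_zero _ ps.length 0 0
  · show ((bs.map (fun size => (size, size, false))).filter (fun b => !b.2.2)).foldl
        (fun acc b => acc + b.2.1) 0 = bs.sum
    rw [List.filter_eq_self.mpr (by
      intro b hb
      rcases List.mem_map.mp hb with ⟨s, _, rfl⟩
      rfl)]
    rw [PySem.List.foldl_add _ (fun (b : Int × Int × Bool) => b.2.1) 0, List.map_map]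
    show 0 + (List.map (fun s : Int => s) bs).sum = bs.sum
    simp

-- ===== VERDICT (by name: the statement is the Claim_ definition above) =====
theorem run_memory_algorithm_spec : Claim_equal_run_memory_algorithm := by
  intro algo bs ps _
  unfold Spec_run_memory_algorithm run_memory_algorithm_alt
  by_cases h1 : algo = "First Fit"
  · simp only [h1, reduceIte]
    exact main_algo bs ps _ (List.Perm.refl _) _ (fun u p hu => pick_FF bs u hu p)
  · by_cases h2 : algo = "Best Fit"
    · simp only [h2, reduceIte]
      exact main_algo bs ps _ (PySem.List.sorted2_perm _ _ _ _) _ (fun u p hu => pick_BF bs u hu p)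
    · simp only [if_neg h1, if_neg h2]
      exact main_other algo h1 h2 bs ps
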